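-- pv_equiv track=rewrite | github.com/d1zm4as/CodeWars | Python/6 Kyu/english_beggars.py | beggars
-- ===== SOURCE A (Python) =====
-- def beggars(values, n):
--     if n<=0:
--         return []
--
--     if n==1:
--         return sum(values)
--
--     lista = []
--     for i in range(n):
--         lista.append(sum(values[i::n]))
--     return lista
-- ===== SOURCE B (Python) =====
-- def beggars(values, n):
--     if n <= 0:
--         return []
--     result = [0] * n
--     for i, v in enumerate(values):
--         result[i % n] += v
--     return result
-- ===== Notes on version B (the rewrite author's own statement) =====
-- stated objective: alternative
-- what changed: A takes n strided slices values[i::n] and sums each; B makes a single pass over values, adding each element into a modulo-indexed bucket of a preallocated result list.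
-- outside the precondition, e.g. on beggars([1, 2], 1): A returns 3, B returns [3]
import Mathlib
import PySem

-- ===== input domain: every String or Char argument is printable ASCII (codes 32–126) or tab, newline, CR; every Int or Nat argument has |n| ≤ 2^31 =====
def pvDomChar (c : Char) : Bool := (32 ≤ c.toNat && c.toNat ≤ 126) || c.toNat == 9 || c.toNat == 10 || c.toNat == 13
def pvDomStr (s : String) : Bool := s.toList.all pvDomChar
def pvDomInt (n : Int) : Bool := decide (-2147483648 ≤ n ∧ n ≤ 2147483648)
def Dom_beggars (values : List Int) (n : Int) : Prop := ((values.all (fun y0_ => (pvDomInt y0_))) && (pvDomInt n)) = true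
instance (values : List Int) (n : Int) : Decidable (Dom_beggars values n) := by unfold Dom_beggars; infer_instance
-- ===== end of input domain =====

-- B replaces A's n strided-slice sums by one modulo-bucketed pass over values (no slice copies).

-- ===== PORT A =====
-- Python A's `n == 1` branch returns `sum(values)` — a plain int, not a list — so that
-- input is excluded by Pre_beggars and the port returns [] there (its value is never claimed).
def beggars (values : List Int) (n : Int) : List Int :=
  if n ≤ 0 then []
  else if n = 1 then []
  else
    (PySem.List.pyRange 0 n 1).foldl
      (fun lista i => lista ++ [((PySem.List.slice? values (some i) none n).getD []).sum])
      []

-- ===== PORT B =====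
def beggars_alt (values : List Int) (n : Int) : List Int :=
  if n ≤ 0 then []
  else
    values.zipIdx.foldl
      (fun result p => result.set (p.2 % n.toNat) (result.getD (p.2 % n.toNat) 0 + p.1))
      (List.replicate n.toNat 0)

-- ===== PRECONDITION & SPEC =====
-- Pre_ excludes only n = 1, where Python A returns sum(values) — an int, not a value of the
-- declared list return type.
def Pre_beggars (values : List Int) (n : Int) : Prop := n ≠ 1
instance (values : List Int) (n : Int) : Decidable (Pre_beggars values n) := by unfold Pre_beggars; infer_instance
def pvWitness_beggars : List Int × Int := ([3, -1, 4, 1, 5], 3)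
def Spec_beggars (values : List Int) (n : Int) (out : List Int) : Prop := out = beggars_alt values n
instance (values : List Int) (n : Int) (out : List Int) : Decidable (Spec_beggars values n out) := by unfold Spec_beggars; infer_instance

-- ===== CLAIM (what is proved, stated in full; the proofs are below) =====
def Claim_equal_beggars : Prop := ∀ (values : List Int) (n : Int), Dom_beggars values n → Pre_beggars values n → Spec_beggars values n (beggars values n)

-- ===== LEMMAS AND PROOFS =====

-- every st-th element of ys, starting with its head
def strided (st : Nat) : List Int → List Int
  | [] => []
  | x :: t => x :: strided st (t.drop (st - 1))
termination_by ys => ys.length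
decreasing_by simp only [List.length_drop, List.length_cons]; omega

@[simp] theorem strided_nil (st : Nat) : strided st [] = [] := by rw [strided.eq_def]

theorem strided_cons (st : Nat) (x : Int) (t : List Int) :
    strided st (x :: t) = x :: strided st (t.drop (st - 1)) := by rw [strided.eq_def]

-- sum of the elements of xs at positions i, i+n, i+2n, …
def bsum (n : Nat) : List Int → Nat → Int
  | [], _ => 0
  | x :: t, 0 => x + bsum n t (n - 1)
  | _ :: t, i + 1 => bsum n t i

theorem bsum_eq_sum_strided (n : Nat) (xs : List Int) : ∀ (i : Nat),
    bsum n xs i = (strided n (xs.drop i)).sum := by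
  induction xs with
  | nil => intro i; simp [bsum]
  | cons x t ih =>
    intro i
    cases i with
    | zero => simp [bsum, strided_cons, ih (n - 1)]
    | succ i => simpa [bsum] using ih i

theorem filterMap_range_strided (st : Nat) (hst : 0 < st) : ∀ (L : Nat) (ys : List Int), ys.length ≤ L →
    List.filterMap (fun k => ys[st * k]?) (List.range ((ys.length + st - 1) / st)) = strided st ys := by
  intro L
  induction L with
  | zero =>
    intro ys h
    have hy : ys = [] := List.eq_nil_of_length_eq_zero (Nat.le_zero.mp h)
    subst hy
    simp
  | succ L ih =>
    intro ys h
    cases ys with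
    | nil =>
      simp
    | cons y t =>
      have hcount : ((y :: t).length + st - 1) / st
          = (((t.drop (st - 1)).length + st - 1) / st) + 1 := by
        simp only [List.length_cons, List.length_drop]
        by_cases hc : st ≤ t.length + 1
        · have h1 : t.length + 1 + st - 1 = (t.length - (st - 1) + st - 1) + st := by omega
          rw [h1, Nat.add_div_right _ hst]
        · rw [Nat.not_le] at hc
          have h1 : t.length - (st - 1) = 0 := by omega
          have h2 : (0 + st - 1) / st = 0 := Nat.div_eq_of_lt (by omega)
          have h3 : (t.length + 1 + st - 1) / st = 1 :=
            Nat.div_eq_of_lt_le (by omega) (by omega)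
          rw [h1, h2, h3]
      rw [hcount, List.range_succ_eq_map, List.filterMap_cons, List.filterMap_map]
      have h0 : (y :: t)[st * 0]? = some y := by simp
      rw [h0]
      have hfun : ∀ k : Nat, (y :: t)[st * (k + 1)]? = (t.drop (st - 1))[st * k]? := by
        intro k
        have he : st * (k + 1) = ((st - 1) + st * k) + 1 := by
          rw [Nat.mul_add, Nat.mul_one]; omega
        rw [he, List.getElem?_cons_succ, List.getElem?_drop]
      have : (List.filterMap (fun k => (y :: t)[st * (k + 1)]?)
            (List.range (((t.drop (st - 1)).length + st - 1) / st)))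
          = List.filterMap (fun k => (t.drop (st - 1))[st * k]?)
            (List.range (((t.drop (st - 1)).length + st - 1) / st)) := by
        apply List.filterMap_congr
        intro k _
        exact hfun k
      simp only [Function.comp] at *
      rw [this, ih (t.drop (st - 1))
        (by simp only [List.length_cons] at h; simp only [List.length_drop]; omega)]
      exact (strided_cons st y t).symm

-- slice? with nonnegative start, no stop and positive step is `strided` of a drop
theorem slice?_stride (xs : List Int) (a st : Nat) (hst : 0 < st) :
    PySem.List.slice? xs (some (a : Int)) none (st : Int) = some (strided st (xs.drop a)) := by
  simp only [PySem.List.slice?, PySem.List.sliceIndices]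
  rw [if_neg (by omega : ¬ (st:Int) = 0)]
  rw [if_neg (by omega : ¬ (st:Int) < 0), if_neg (by omega : ¬ (st:Int) < 0), if_neg (by omega : ¬ (st:Int) < 0)]
  rw [if_neg (by omega : ¬ (a:Int) < 0)]
  rw [if_pos (by omega : (0:Int) < (st:Int))]
  by_cases hal : a < xs.length
  · rw [min_eq_left (by omega : (a:Int) ≤ (xs.length:Int))]
    rw [if_pos (by omega : (a:Int) < (xs.length:Int))]
    have hc : (((xs.length:Int) - a + st - 1) / st).toNat = ((xs.drop a).length + st - 1) / st := by
      have h1 : ((xs.length:Int) - a + st - 1) = (((xs.length - a + st - 1 : Nat)) : Int) := by omega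
      rw [h1]
      have h2 : ((xs.length - a + st - 1 : Nat) : Int) / (st:Int) = (((xs.length - a + st - 1) / st : Nat) : Int) := by
        push_cast; ring
      rw [h2, Int.toNat_natCast, List.length_drop]
    rw [hc]
    have hfun : ∀ k : Nat, xs[((a:Int) + st * k).toNat]? = (xs.drop a)[st * k]? := by
      intro k
      have h3 : ((a:Int) + st * k) = ((a + st * k : Nat) : Int) := by push_cast; ring
      rw [h3, Int.toNat_natCast, List.getElem?_drop]
    refine congrArg some ?_
    exact (List.filterMap_congr (fun k _ => hfun k)).trans
      (filterMap_range_strided st hst (xs.drop a).length _ le_rfl)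
  · rw [min_eq_right (by omega : (xs.length:Int) ≤ (a:Int))]
    rw [if_neg (by omega : ¬ (xs.length:Int) < (xs.length:Int))]
    have hd : xs.drop a = [] := List.drop_eq_nil_of_le (by omega)
    simp [hd]

theorem foldl_snoc {α : Type} (g : α → Int) (l : List α) : ∀ acc : List Int,
    l.foldl (fun a x => a ++ [g x]) acc = acc ++ l.map g := by
  induction l with
  | nil => intro acc; simp
  | cons x t ih => intro acc; simp [ih]

-- the one-pass fold of B computes bucket sums
theorem map_range_getD (res : List Int) :
    (List.range res.length).map (fun i => res.getD i 0) = res := by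
  apply List.ext_getElem
  · simp
  · intro i h1 h2
    simp [List.getD_eq_getElem?_getD, h2]

theorem getD_set (res : List Int) (k i : Nat) (v : Int) (hk : k < res.length) :
    (res.set k v).getD i 0 = if i = k then v else res.getD i 0 := by
  by_cases h : i = k
  · subst h; simp [List.getD_eq_getElem?_getD, hk]
  · simp [List.getD_eq_getElem?_getD, List.getElem?_set_ne (fun hh => h hh.symm), h]

theorem emod_eq_of (a b r k : Int) (h0 : 0 ≤ r) (h1 : r < b) (hk : a = b * k + r) : a % b = r := by
  rw [hk, add_comm, Int.add_mul_emod_self_left]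
  exact Int.emod_eq_of_lt h0 h1

theorem bucket_inv (n : Nat) (hn : 0 < n) : ∀ (xs : List Int) (j : Nat) (res : List Int), res.length = n →
    (xs.zipIdx j).foldl
      (fun result p => result.set (p.2 % n) (result.getD (p.2 % n) 0 + p.1)) res
    = (List.range n).map (fun i => res.getD i 0 + bsum n xs (((i : Int) - (j : Int)) % (n : Int)).toNat) := by
  intro xs
  induction xs with
  | nil =>
    intro j res hres
    simp only [List.zipIdx_nil, List.foldl_nil]
    conv_lhs => rw [← map_range_getD res]
    rw [hres]
    exact List.map_congr_left (fun i _ => by simp [bsum])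
  | cons x t ih =>
    intro j res hres
    rw [List.zipIdx_cons, List.foldl_cons]
    dsimp only
    rw [ih (j + 1) _ (by simp [hres])]
    apply List.map_congr_left
    intro i hi
    have hi' : i < n := List.mem_range.mp hi
    have hjn : j % n < n := Nat.mod_lt _ hn
    rw [getD_set _ _ _ _ (by omega)]
    obtain ⟨e, hee, helt⟩ : ∃ e : Nat, ((i : Int) - (j : Int)) % (n : Int) = (e : Int) ∧ e < n := by
      refine ⟨(((i : Int) - (j : Int)) % (n : Int)).toNat, ?_, ?_⟩
      · exact (Int.toNat_of_nonneg (Int.emod_nonneg _ (by omega))).symm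
      · have := Int.emod_lt_of_pos ((i : Int) - (j : Int)) (by omega : (0:Int) < (n:Int))
        have := Int.emod_nonneg ((i : Int) - (j : Int)) (by omega : (n:Int) ≠ 0)
        omega
    -- e = 0 iff this element lands in bucket i
    have hq := Int.mul_ediv_add_emod ((i : Int) - (j : Int)) (n : Int)
    have hiff : e = 0 ↔ i = j % n := by
      have h1 : ((i : Int) - (j : Int)) % (n : Int) = ((i : Int) - ((j % n : Nat) : Int)) % (n : Int) := by
        rw [Int.sub_emod, Int.sub_emod (i : Int) ((j % n : Nat) : Int)]
        rw [Int.natCast_mod, Int.emod_emod_of_dvd _ dvd_rfl]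
      constructor
      · intro h0
        rw [h0] at hee
        rw [h1] at hee
        rcases lt_trichotomy (i : Int) ((j % n : Nat) : Int) with hlt | heq | hgt
        · have : ((i : Int) - ((j % n : Nat) : Int)) % (n : Int) = (i : Int) - ((j % n : Nat) : Int) + n :=
            emod_eq_of _ _ _ (-1) (by omega) (by omega) (by ring)
          omega
        · omega
        · have : ((i : Int) - ((j % n : Nat) : Int)) % (n : Int) = (i : Int) - ((j % n : Nat) : Int) :=
            Int.emod_eq_of_lt (by omega) (by omega)
          omega
      · intro h0
        rw [h1] at hee
        have h2 : ((i : Int) - ((j % n : Nat) : Int)) = 0 := by omega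
        rw [h2] at hee
        simpa using hee.symm
    have hsucc : ((i : Int) - ((j : Nat) + 1 : Nat)) % (n : Int) = ((if e = 0 then n - 1 else e - 1 : Nat) : Int) := by
      have h1 : ((i : Int) - ((j : Nat) + 1 : Nat)) = ((i : Int) - (j : Int)) - 1 := by push_cast; ring
      by_cases h0 : e = 0
      · rw [if_pos h0, h1]
        have hnq : (n : Int) * (((i : Int) - (j : Int)) / (n : Int)) = (i : Int) - (j : Int) := by
          rw [hee, h0] at hq
          simpa using hq
        refine emod_eq_of _ _ _ (((i : Int) - (j : Int)) / (n : Int) - 1)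
          (by omega) (by omega) ?_
        rw [Nat.cast_sub hn, mul_sub, mul_one]
        push_cast
        linarith [hnq]
      · rw [if_neg h0, h1]
        have hnq : (n : Int) * (((i : Int) - (j : Int)) / (n : Int)) + (e : Int) = (i : Int) - (j : Int) := by
          rw [hee] at hq
          exact hq
        refine emod_eq_of _ _ _ (((i : Int) - (j : Int)) / (n : Int))
          (by omega) (by omega) ?_
        rw [Nat.cast_sub (by omega : 1 ≤ e)]
        push_cast
        linarith [hnq]
    rw [hee, hsucc, Int.toNat_natCast, Int.toNat_natCast]
    by_cases h0 : e = 0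
    · have hij : i = j % n := hiff.mp h0
      rw [if_pos hij, h0, ← hij]
      simp [bsum]
      ring
    · rw [if_neg (fun hh => h0 (hiff.mpr hh)), if_neg h0]
      obtain ⟨e', rfl⟩ : ∃ e', e = e' + 1 := ⟨e - 1, by omega⟩
      simp [bsum]

-- ===== VERDICT (by name: the statement is the Claim_ definition above) =====
theorem beggars_spec : Claim_equal_beggars := by
  intro values n _ hpre
  show beggars values n = beggars_alt values n
  unfold beggars beggars_alt
  by_cases h0 : n ≤ 0
  · simp [h0]
  · rw [if_neg h0, if_neg h0, if_neg (hpre : ¬ n = 1)]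
    have hN : ((n.toNat : Int)) = n := Int.toNat_of_nonneg (by omega)
    have hNpos : 0 < n.toNat := by omega
    rw [bucket_inv n.toNat hNpos values 0 (List.replicate n.toNat 0) (by simp)]
    rw [PySem.List.pyRange_one 0 n]
    simp only [Int.sub_zero, List.foldl_map]
    rw [foldl_snoc (fun y : Nat => ((PySem.List.slice? values (some ((0 : Int) + y)) none n).getD []).sum)
      (List.range n.toNat), List.nil_append]
    apply List.map_congr_left
    intro i hi
    have hi' : i < n.toNat := List.mem_range.mp hi
    have hz : ((0 : Int) + (i : Nat)) = ((i : Nat) : Int) := by ring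
    conv_lhs => rw [hz, ← hN]
    rw [slice?_stride values i n.toNat hNpos, Option.getD_some]
    rw [← bsum_eq_sum_strided]
    have hmod : (((i : Int) - ((0 : Nat) : Int)) % ((n.toNat : Nat) : Int)).toNat = i := by
      have h1 : ((i : Int) - ((0 : Nat) : Int)) = (i : Int) := by push_cast; ring
      rw [h1, Int.emod_eq_of_lt (by omega) (by omega), Int.toNat_natCast]
    rw [hmod]
    simp
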